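-- pv_equiv track=rewrite | github.com/AdeleHardie/adventofcode | 2023/day_05.py | parse_maps
-- ===== SOURCE A (Python) =====
-- def parse_maps(contents):
--     seeds = [int(seed) for seed in contents[0].split(':')[1].split()]
--     maps = []
--     current = []
--
--     for line in contents[3:]:
--         # line describes new map
--         if ':' in line:
--             maps.append(current)
--             current = []
--         elif line != '':
--             values = [int(val) for val in line.split()]
--             current.append([values[1], values[1]+values[2], values[0]-values[1]])
--     maps.append(current)
--
--     return seeds, maps
-- ===== SOURCE B (Python) =====
-- def _parse_blocks(lines):
--     # recursion on the list structure, building the block list front-to-back by cons: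
--     # a header opens a fresh empty block, a data line is prepended to the first block
--     # of the recursively parsed tail, blanks are dropped
--     if not lines:
--         return [[]]
--     head, rest = lines[0], lines[1:]
--     if ':' in head:
--         return [[]] + _parse_blocks(rest)
--     if head == '':
--         return _parse_blocks(rest)
--     v = [int(x) for x in head.split()]
--     blocks = _parse_blocks(rest)
--     return [[[v[1], v[1] + v[2], v[0] - v[1]]] + blocks[0]] + blocks[1:]
--
--
-- def parse_maps(contents):
--     seeds = [int(seed) for seed in contents[0].split(':')[1].split()]
--     return seeds, _parse_blocks(contents[3:])
-- ===== Notes on version B (the rewrite author's own statement) =====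
-- stated objective: alternative
-- what changed: A's iterative loop with a (maps, current) accumulator and flush-on-header is replaced by a single structural recursion that builds the block list front-to-back: a header conses a fresh block, a data line prepends its triple to the head block of the recursive result; no accumulator and no final flush exist in B.
import Mathlib
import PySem

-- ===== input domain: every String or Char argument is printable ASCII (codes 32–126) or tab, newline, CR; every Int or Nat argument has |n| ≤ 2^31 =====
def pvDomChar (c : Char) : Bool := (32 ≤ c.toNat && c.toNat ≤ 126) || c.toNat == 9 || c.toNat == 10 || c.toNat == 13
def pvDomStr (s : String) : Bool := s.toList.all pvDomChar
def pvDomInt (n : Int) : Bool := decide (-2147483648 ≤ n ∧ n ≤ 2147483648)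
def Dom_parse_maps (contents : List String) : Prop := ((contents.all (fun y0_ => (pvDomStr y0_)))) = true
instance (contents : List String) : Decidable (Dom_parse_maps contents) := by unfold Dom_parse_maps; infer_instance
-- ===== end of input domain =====

-- B replaces A's iterative accumulate-and-flush loop by a structural recursion that builds the
-- block list front-to-back (alternative decomposition, same cost).

-- ===== PORT A =====
-- the loop body of A's single for-loop: flush on header, append a range triple on a data line
def pvStepA (st : List (List (List Int)) × List (List Int)) (line : String) :
    List (List (List Int)) × List (List Int) :=
  if PySem.Str.isIn ":" line then (st.1 ++ [st.2], [])
  else if line ≠ "" then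
    let values := (PySem.Str.split₀ line).map (fun v => (PySem.Int.ofStr? v).getD 0)
    (st.1, st.2 ++ [[PySem.List.pyGetD values 1 0,
                     PySem.List.pyGetD values 1 0 + PySem.List.pyGetD values 2 0,
                     PySem.List.pyGetD values 0 0 - PySem.List.pyGetD values 1 0]])
  else st

def parse_maps (contents : List String) : List Int × List (List (List Int)) :=
  let seeds := (PySem.Str.split₀ (PySem.List.pyGetD
      ((PySem.Str.split? (PySem.List.pyGetD contents 0 "") ":").getD []) 1 "")).map
      (fun seed => (PySem.Int.ofStr? seed).getD 0)
  let st := (PySem.List.slice contents (some 3) none).foldl pvStepA ([], [])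
  (seeds, st.1 ++ [st.2])

-- ===== PORT B =====
-- B's structural recursion over the lines: header ⇒ cons a fresh block, blank ⇒ skip,
-- data line ⇒ prepend its triple to the head block of the recursive result
def pvParseBlocks : List String → List (List (List Int))
  | [] => [[]]
  | head :: rest =>
    if PySem.Str.isIn ":" head then [] :: pvParseBlocks rest
    else if head = "" then pvParseBlocks rest
    else
      let v := (PySem.Str.split₀ head).map (fun x => (PySem.Int.ofStr? x).getD 0)
      let blocks := pvParseBlocks rest
      ([[PySem.List.pyGetD v 1 0,
         PySem.List.pyGetD v 1 0 + PySem.List.pyGetD v 2 0,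
         PySem.List.pyGetD v 0 0 - PySem.List.pyGetD v 1 0]] ++ blocks.headD []) :: blocks.tail

def parse_maps_alt (contents : List String) : List Int × List (List (List Int)) :=
  let seeds := (PySem.Str.split₀ (PySem.List.pyGetD
      ((PySem.Str.split? (PySem.List.pyGetD contents 0 "") ":").getD []) 1 "")).map
      (fun seed => (PySem.Int.ofStr? seed).getD 0)
  (seeds, pvParseBlocks (PySem.List.slice contents (some 3) none))

-- ===== PRECONDITION & SPEC =====
-- Pre_ excludes exactly the inputs where Python A raises: an empty contents list or a first line
-- without ':' (IndexError), a seed token that is not an int (ValueError), and data lines in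
-- contents[3:] with a non-int token (ValueError) or fewer than three tokens (IndexError).
def Pre_parse_maps (contents : List String) : Prop :=
  contents ≠ [] ∧
  2 ≤ ((PySem.Str.split? (contents.headD "") ":").getD []).length ∧
  ((PySem.Str.split₀ (((PySem.Str.split? (contents.headD "") ":").getD []).getD 1 "")).all
      (fun t => (PySem.Int.ofStr? t).isSome)) = true ∧
  ∀ line ∈ contents.drop 3,
    PySem.Str.isIn ":" line = true ∨ line = "" ∨
      (3 ≤ (PySem.Str.split₀ line).length ∧
        ((PySem.Str.split₀ line).all (fun t => (PySem.Int.ofStr? t).isSome)) = true)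
instance (contents : List String) : Decidable (Pre_parse_maps contents) := by
  unfold Pre_parse_maps; infer_instance

def pvWitness_parse_maps : List String :=
  ["seeds: 79 14", "", "seed-to-soil map:", "50 98 2", "", "soil map:", "0 15 37"]

def Spec_parse_maps (contents : List String) (out : List Int × List (List (List Int))) : Prop := out = parse_maps_alt contents
instance (contents : List String) (out : List Int × List (List (List Int))) : Decidable (Spec_parse_maps contents out) := by unfold Spec_parse_maps; infer_instance

-- ===== CLAIM (what is proved, stated in full; the proofs are below) =====
def Claim_equal_parse_maps : Prop := ∀ (contents : List String), Dom_parse_maps contents → Pre_parse_maps contents → Spec_parse_maps contents (parse_maps contents)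

-- ===== LEMMAS AND PROOFS =====

def pvTriple (line : String) : List Int :=
  let values := (PySem.Str.split₀ line).map (fun v => (PySem.Int.ofStr? v).getD 0)
  [PySem.List.pyGetD values 1 0,
   PySem.List.pyGetD values 1 0 + PySem.List.pyGetD values 2 0,
   PySem.List.pyGetD values 0 0 - PySem.List.pyGetD values 1 0]

lemma pvParseBlocks_cons (head : String) (rest : List String) :
    pvParseBlocks (head :: rest)
      = if PySem.Chars.isIn [':'] head.toList = true then [] :: pvParseBlocks rest
        else if head = "" then pvParseBlocks rest
        else ([pvTriple head] ++ (pvParseBlocks rest).headD []) :: (pvParseBlocks rest).tail := rfl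

lemma pvParseBlocks_ne_nil (lines : List String) : pvParseBlocks lines ≠ [] := by
  cases lines with
  | nil => simp [pvParseBlocks]
  | cons h t =>
    rw [pvParseBlocks_cons]
    split_ifs with h1 h2
    · simp
    · exact pvParseBlocks_ne_nil t
    · simp

-- key invariant: A's fold from state (M, C) with the final flush appended equals
-- M ++ (C prepended to the head block of B's recursive result)
lemma pv_key (lines : List String) :
    ∀ (M : List (List (List Int))) (C : List (List Int)),
      (let st := lines.foldl pvStepA (M, C); st.1 ++ [st.2])
        = M ++ (C ++ (pvParseBlocks lines).headD []) :: (pvParseBlocks lines).tail := by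
  induction lines with
  | nil => intro M C; simp [pvParseBlocks]
  | cons line ls ih =>
    intro M C
    obtain ⟨b, bs, hbl⟩ := List.exists_cons_of_ne_nil (pvParseBlocks_ne_nil ls)
    simp only [List.foldl_cons]
    by_cases h1 : PySem.Chars.isIn [':'] line.toList = true
    · have hA : pvStepA (M, C) line = (M ++ [C], []) := by simp [pvStepA, PySem.Str.isIn, h1]
      rw [hA, pvParseBlocks_cons, if_pos h1]
      have := ih (M ++ [C]) []
      simp only [List.nil_append] at this
      rw [this, hbl]
      simp
    · by_cases h2 : line = ""
      · have hf : PySem.Chars.isIn [':'] ([] : List Char) = false := by decide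
        have hA : pvStepA (M, C) line = (M, C) := by
          subst h2; simp [pvStepA, PySem.Str.isIn, hf]
        rw [hA, pvParseBlocks_cons, if_neg h1, if_pos h2]
        exact ih M C
      · have hA : pvStepA (M, C) line = (M, C ++ [pvTriple line]) := by
          simp [pvStepA, PySem.Str.isIn, h1, h2, pvTriple]
        rw [hA, pvParseBlocks_cons, if_neg h1, if_neg h2, ih M (C ++ [pvTriple line]), hbl]
        simp

-- ===== VERDICT (by name: the statement is the Claim_ definition above) =====
theorem parse_maps_spec : Claim_equal_parse_maps := by
  intro contents _ _
  unfold Spec_parse_maps parse_maps parse_maps_alt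
  have h := pv_key (PySem.List.slice contents (some 3) none) [] []
  simp only [List.nil_append] at h
  obtain ⟨b, bs, hbl⟩ := List.exists_cons_of_ne_nil
    (pvParseBlocks_ne_nil (PySem.List.slice contents (some 3) none))
  rw [hbl] at h
  simp only [List.headD_cons, List.tail_cons] at h
  simp only [h, hbl]
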